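-- pv_equiv track=rewrite | github.com/pypi-data/pypi-mirror-226 | packages/libprocess/libprocess-0.1.4-py3-none-any.whl/libprocess/david_rumsey_map_collection/_process_metadata.py | get_tags
-- ===== SOURCE A (Python) =====
-- from typing import Any, Dict, List, Union
--
-- def get_attr(field_values: List[Dict[str, List]], key: str) -> Union[List, None]:
--     d = next((d for d in field_values if key in d), None)
--     return d[key] if d is not None else None
--
-- def get_tags(field_values: List[Dict]) -> List[str]:
--     tags = []
--     tags_type = get_attr(field_values, "Type")
--     if tags_type is not None:
--         tags += tags_type
--     tags_subject = get_attr(field_values, "Subject")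
--     if tags_subject is not None:
--         tags += tags_subject
--     tags_pub_type = get_attr(field_values, "Pub Type")
--     if tags_pub_type is not None:
--         tags += tags_pub_type
--
--     # Discard useless tags
--     useless_tags = [
--         "Data Visualization",
--     ]
--     tags = [d for d in tags if d not in useless_tags]
--     return list(set(tags))
-- ===== SOURCE B (Python) =====
-- def get_tags(field_values):
--     # One pass over field_values: index each key by the value from the FIRST dict
--     # containing it, then read off the three fixed keys.
--     index = {}
--     for d in field_values:
--         for k, v in d.items():
--             if k not in index:
--                 index[k] = v
--     tags = []
--     for key in ("Type", "Subject", "Pub Type"):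
--         tags += index.get(key, [])
--     return list(set(t for t in tags if t != "Data Visualization"))
-- ===== Notes on version B (the rewrite author's own statement) =====
-- stated objective: idiomatic
-- what changed: Instead of three separate first-match scans of field_values (one per key via get_attr), B builds a first-occurrence-wins key index in a single pass over all dicts and then reads the three fixed keys from the index.
import Mathlib
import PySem

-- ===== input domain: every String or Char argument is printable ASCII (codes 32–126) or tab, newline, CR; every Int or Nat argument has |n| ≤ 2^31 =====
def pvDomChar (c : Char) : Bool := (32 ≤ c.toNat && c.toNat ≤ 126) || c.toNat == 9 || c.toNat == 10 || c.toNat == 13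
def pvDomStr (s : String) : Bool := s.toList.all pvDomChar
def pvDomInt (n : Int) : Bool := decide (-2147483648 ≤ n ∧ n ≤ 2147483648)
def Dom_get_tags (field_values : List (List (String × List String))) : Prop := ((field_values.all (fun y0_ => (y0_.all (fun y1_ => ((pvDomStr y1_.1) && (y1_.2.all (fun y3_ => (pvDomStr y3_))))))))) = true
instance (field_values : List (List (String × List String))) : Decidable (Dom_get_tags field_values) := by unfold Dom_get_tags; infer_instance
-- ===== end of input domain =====

-- B replaces A's three separate first-match scans of field_values by a single pass
-- building a first-occurrence-wins key index (objective: idiomatic/alternative).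

-- ===== PORT A =====
-- next((d for d in field_values if key in d), None); return d[key] if d is not None else None
-- (d[key] cannot raise: find? guarantees key ∈ d, so get? is some; returning get? directly is exact)
def get_attr (field_values : List (List (String × List String))) (key : String) : Option (List String) :=
  match field_values.find? (fun d => (PySem.Dict.mk d).contains key) with
  | some d => (PySem.Dict.mk d).get? key
  | none => none

def get_tags (field_values : List (List (String × List String))) : List String :=
  let tags : List String := []
  let tags := match get_attr field_values "Type" with
    | some tags_type => tags ++ tags_type
    | none => tags
  let tags := match get_attr field_values "Subject" with
    | some tags_subject => tags ++ tags_subject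
    | none => tags
  let tags := match get_attr field_values "Pub Type" with
    | some tags_pub_type => tags ++ tags_pub_type
    | none => tags
  let useless_tags : List String := ["Data Visualization"]
  let tags := tags.filter (fun d => !(useless_tags.contains d))
  PySem.Set.ofList tags

-- ===== PORT B =====
-- for d in field_values: for k, v in d.items(): if k not in index: index[k] = v
def pvIndex (field_values : List (List (String × List String))) : PySem.Dict String (List String) :=
  field_values.foldl
    (fun idx d => d.foldl
      (fun idx kv => if idx.contains kv.1 then idx else idx.insert kv.1 kv.2) idx)
    PySem.Dict.empty

def get_tags_alt (field_values : List (List (String × List String))) : List String :=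
  let index := pvIndex field_values
  let tags := ["Type", "Subject", "Pub Type"].foldl (fun acc key => acc ++ index.getD key []) []
  PySem.Set.ofList (tags.filter (fun t => !(t == "Data Visualization")))

-- ===== PRECONDITION & SPEC =====
def Spec_get_tags (field_values : List (List (String × List String))) (out : List String) : Prop := out = get_tags_alt field_values
instance (field_values : List (List (String × List String))) (out : List String) : Decidable (Spec_get_tags field_values out) := by unfold Spec_get_tags; infer_instance

-- ===== CLAIM (what is proved, stated in full; the proofs are below) =====
def Claim_equal_get_tags : Prop := ∀ (field_values : List (List (String × List String))), Dom_get_tags field_values → Spec_get_tags field_values (get_tags field_values)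

-- ===== LEMMAS AND PROOFS =====

-- the inner loop over one dict: first-occurrence-wins, so lookups fall back from idx to d
theorem pvInner_get? (d : List (String × List String)) (idx : PySem.Dict String (List String)) (k : String) :
    (d.foldl (fun idx kv => if idx.contains kv.1 then idx else idx.insert kv.1 kv.2) idx).get? k
      = (idx.get? k).or ((PySem.Dict.mk d).get? k) := by
  induction d generalizing idx with
  | nil =>
      have h : (PySem.Dict.mk ([] : List (String × List String))).get? k = none := rfl
      simp [List.foldl, h]
  | cons kv d ih =>
      simp only [List.foldl, ih]
      rw [PySem.Dict.get?_mk_cons]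
      by_cases hc : idx.contains kv.1
      · rw [if_pos hc]
        by_cases he : kv.1 = k
        · rw [← he] at *
          rw [PySem.Dict.contains_eq_isSome_get?] at hc
          cases hg : idx.get? kv.1 with
          | none => rw [hg] at hc; simp at hc
          | some v => simp
        · have hb : (kv.1 == k) = false := beq_eq_false_iff_ne.mpr he
          rw [hb]
          simp
      · rw [if_neg hc]
        by_cases he : k = kv.1
        · have hn : idx.get? kv.1 = none := by
            rw [PySem.Dict.contains_eq_isSome_get?] at hc
            cases hg : idx.get? kv.1 with
            | none => rfl
            | some v => rw [hg] at hc; simp at hc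
          rw [he]
          rw [PySem.Dict.get?_insert_self, hn]
          simp
        · have hb : (kv.1 == k) = false := beq_eq_false_iff_ne.mpr (fun h => he h.symm)
          rw [PySem.Dict.get?_insert_of_ne idx kv.2 he, hb]
          simp

-- the whole index: a lookup is the value from the FIRST dict containing the key, i.e. get_attr
theorem pvIndex_get?_aux (fv : List (List (String × List String))) (idx : PySem.Dict String (List String)) (k : String) :
    (fv.foldl
      (fun idx d => d.foldl
        (fun idx kv => if idx.contains kv.1 then idx else idx.insert kv.1 kv.2) idx)
      idx).get? k = (idx.get? k).or (get_attr fv k) := by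
  induction fv generalizing idx with
  | nil => simp [get_attr, List.foldl]
  | cons d fv ih =>
      simp only [List.foldl, ih, pvInner_get?, Option.or_assoc]
      congr 1
      unfold get_attr
      by_cases hc : (PySem.Dict.mk d).contains k
      · rw [List.find?_cons_of_pos (p := fun d => (PySem.Dict.mk d).contains k) hc]
        rw [PySem.Dict.contains_eq_isSome_get?] at hc
        cases hg : (PySem.Dict.mk d).get? k with
        | none => rw [hg] at hc; simp at hc
        | some v => simp [hg]
      · have hn : (PySem.Dict.mk d).get? k = none := by
          rw [PySem.Dict.contains_eq_isSome_get?] at hc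
          cases hg : (PySem.Dict.mk d).get? k with
          | none => rfl
          | some v => rw [hg] at hc; simp at hc
        rw [List.find?_cons_of_neg (p := fun d => (PySem.Dict.mk d).contains k) hc, hn]
        simp

theorem pvIndex_get? (fv : List (List (String × List String))) (k : String) :
    (pvIndex fv).get? k = get_attr fv k := by
  unfold pvIndex
  rw [pvIndex_get?_aux]
  simp

theorem pvAppOpt (acc : List String) (o : Option (List String)) :
    (match o with | some t => acc ++ t | none => acc) = acc ++ o.getD [] := by
  cases o <;> simp

-- ===== VERDICT (by name: the statement is the Claim_ definition above) =====
theorem get_tags_spec : Claim_equal_get_tags := by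
  intro fv _
  unfold Spec_get_tags get_tags get_tags_alt
  simp only [List.foldl_cons, List.foldl_nil]
  rw [pvAppOpt, pvAppOpt, pvAppOpt]
  simp only [PySem.Dict.getD_eq_get?_getD, pvIndex_get?]
  congr 1
  apply List.filter_congr
  intro x _
  show (!(["Data Visualization"].contains x)) = (!(x == "Data Visualization"))
  rw [List.contains, List.elem_cons, List.elem_nil]
  cases x == "Data Visualization" <;> rfl
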